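-- pv_equiv track=rewrite | github.com/ThiagoSob/Prova-PYDS---Revis-o-geral | Prova_aula7.py | fazenda_producao_maximo_minimo
-- ===== SOURCE A (Python) =====
-- banco_de_dados = {
--     'Fazenda A':{
--         'Milho':{'2021':147, '2022':223, '2023':104},
--         'Soja':{'2021':57, '2022':95, '2023':103},
--         'Trigo':{'2021':302, '2022':401, '2023':560}
--         },
--     'Fazenda B':{
--             'Milho':{'2021':590, '2022':605, '2023':601},
--             'Soja':{'2021':107, '2022':195, '2023':174},
--             'Trigo':{'2021':157, '2022':135, '2023':174}
--             },
--     'Fazenda C':{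
--         'Milho':{'2021':54, '2022':35, '2023':78},
--         'Soja':{'2021':603, '2022':774, '2023':875},
--         'Trigo':{'2021':208, '2022':145, '2023':202}
--         }
-- }
--
-- def fazenda_producao_maximo_minimo(ano_escolhido):
--
--     total_por_fazenda_ano = {}
--
--     for fazenda, culturas in banco_de_dados.items():
--         total_por_fazenda_ano[fazenda] ={}
--         for cultura, anos in culturas.items():
--             for ano, producao in anos.items():
--                 if ano == ano_escolhido:
--                     if ano not in total_por_fazenda_ano[fazenda]:
--                         total_por_fazenda_ano[fazenda][ano] = 0
--                     total_por_fazenda_ano[fazenda][ano] += producao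
--
--     fazenda_maxima = max(total_por_fazenda_ano.items(), key=lambda item: item[1].get(ano_escolhido, 0))[0]
--     fazenda_minima = min(total_por_fazenda_ano.items(), key=lambda item: item[1].get(ano_escolhido, 0))[0]
--
--     return f' -Fazenda com Produção Máxima: {fazenda_maxima}\n -Fazenda com Procução Mínima: {fazenda_minima}'
-- ===== SOURCE B (Python) =====
-- banco_de_dados = {
--     'Fazenda A':{
--         'Milho':{'2021':147, '2022':223, '2023':104},
--         'Soja':{'2021':57, '2022':95, '2023':103},
--         'Trigo':{'2021':302, '2022':401, '2023':560}
--         },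
--     'Fazenda B':{
--             'Milho':{'2021':590, '2022':605, '2023':601},
--             'Soja':{'2021':107, '2022':195, '2023':174},
--             'Trigo':{'2021':157, '2022':135, '2023':174}
--             },
--     'Fazenda C':{
--         'Milho':{'2021':54, '2022':35, '2023':78},
--         'Soja':{'2021':603, '2022':774, '2023':875},
--         'Trigo':{'2021':208, '2022':145, '2023':202}
--         }
-- }
--
-- def fazenda_producao_maximo_minimo(ano_escolhido):
--     # One pass: per-farm year total, running strict max/min seeded from the first farm
--     fazendas = list(banco_de_dados.items())
--     f0, c0 = fazendas[0]
--     t0 = sum(anos.get(ano_escolhido, 0) for anos in c0.values())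
--     fazenda_maxima, valor_maximo = f0, t0
--     fazenda_minima, valor_minimo = f0, t0
--     for fazenda, culturas in fazendas[1:]:
--         t = sum(anos.get(ano_escolhido, 0) for anos in culturas.values())
--         if t > valor_maximo:
--             fazenda_maxima, valor_maximo = fazenda, t
--         if t < valor_minimo:
--             fazenda_minima, valor_minimo = fazenda, t
--     return f' -Fazenda com Produção Máxima: {fazenda_maxima}\n -Fazenda com Procução Mínima: {fazenda_minima}'
-- ===== Notes on version B (the rewrite author's own statement) =====
-- stated objective: simpler
-- what changed: Replaces A's intermediate nested dict of per-farm-per-year totals plus two key-based max/min scans by a single pass over the farms that computes each farm's total for the year directly and keeps running strict max/min seeded from the first farm.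
import Mathlib
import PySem

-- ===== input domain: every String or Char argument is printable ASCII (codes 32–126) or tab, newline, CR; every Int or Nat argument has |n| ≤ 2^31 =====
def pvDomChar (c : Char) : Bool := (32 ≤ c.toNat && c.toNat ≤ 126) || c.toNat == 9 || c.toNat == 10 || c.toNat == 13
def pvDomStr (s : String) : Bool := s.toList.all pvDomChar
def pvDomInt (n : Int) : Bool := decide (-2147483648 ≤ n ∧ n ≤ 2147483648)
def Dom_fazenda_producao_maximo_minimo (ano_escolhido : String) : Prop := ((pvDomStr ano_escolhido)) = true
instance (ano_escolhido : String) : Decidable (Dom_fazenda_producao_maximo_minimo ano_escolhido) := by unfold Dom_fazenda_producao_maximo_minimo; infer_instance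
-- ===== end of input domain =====

-- B replaces A's build-a-nested-dict-then-max/min-with-key pass by a single fold keeping running
-- strict max/min of per-farm totals (objective: simpler); return value proved equal for every input.

-- ===== PORT A =====
-- module-level constant banco_de_dados (dict literals as insertion-ordered association lists)
def bancoDeDados : List (String × List (String × List (String × Int))) :=
  [ ("Fazenda A",
      [ ("Milho", [("2021", 147), ("2022", 223), ("2023", 104)]),
        ("Soja",  [("2021", 57),  ("2022", 95),  ("2023", 103)]),
        ("Trigo", [("2021", 302), ("2022", 401), ("2023", 560)]) ]),
    ("Fazenda B",
      [ ("Milho", [("2021", 590), ("2022", 605), ("2023", 601)]),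
        ("Soja",  [("2021", 107), ("2022", 195), ("2023", 174)]),
        ("Trigo", [("2021", 157), ("2022", 135), ("2023", 174)]) ]),
    ("Fazenda C",
      [ ("Milho", [("2021", 54),  ("2022", 35),  ("2023", 78)]),
        ("Soja",  [("2021", 603), ("2022", 774), ("2023", 875)]),
        ("Trigo", [("2021", 208), ("2022", 145), ("2023", 202)]) ]) ]

def fazenda_producao_maximo_minimo (ano_escolhido : String) : String :=
  -- total_por_fazenda_ano built exactly as A's triple loop over .items()
  let total_por_fazenda_ano : PySem.Dict String (PySem.Dict String Int) :=
    bancoDeDados.foldl (fun tot fc =>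
      let tot := tot.insert fc.1 PySem.Dict.empty
      fc.2.foldl (fun tot ca =>
        ca.2.foldl (fun tot ap =>
          if ap.1 == ano_escolhido then
            -- total_por_fazenda_ano[fazenda] : the key was inserted above, so get? is some; getD is exact here
            let inner := tot.getD fc.1 PySem.Dict.empty
            let inner := if inner.contains ap.1 then inner else inner.insert ap.1 0
            tot.insert fc.1 (inner.insert ap.1 (inner.getD ap.1 0 + ap.2))
          else tot) tot) tot) PySem.Dict.empty
  -- max/min over .items() with key item[1].get(ano_escolhido, 0); first extremal wins, as in Python
  let fazenda_maxima :=
    match PySem.List.max? total_por_fazenda_ano.items (fun item => item.2.getD ano_escolhido 0) with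
    | some it => it.1
    | none => ""  -- unreachable: the dict has the three farms (Python max would raise only on empty)
  let fazenda_minima :=
    match PySem.List.min? total_por_fazenda_ano.items (fun item => item.2.getD ano_escolhido 0) with
    | some it => it.1
    | none => ""  -- unreachable
  " -Fazenda com Produção Máxima: " ++ fazenda_maxima ++ "\n -Fazenda com Procução Mínima: " ++ fazenda_minima

-- ===== PORT B =====
-- sum(anos.get(ano_escolhido, 0) for anos in culturas.values())
def pvTotalFarm (ano_escolhido : String) (culturas : List (String × List (String × Int))) : Int :=
  (culturas.map (fun ca =>
    match ca.2.find? (fun ap => ap.1 == ano_escolhido) with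
    | some ap => ap.2
    | none => 0)).sum

def fazenda_producao_maximo_minimo_alt (ano_escolhido : String) : String :=
  match bancoDeDados with
  | [] => ""  -- unreachable: banco_de_dados is non-empty (Source B indexes fazendas[0])
  | fc0 :: rest =>
    let t0 := pvTotalFarm ano_escolhido fc0.2
    let r := rest.foldl (fun (st : (String × Int) × (String × Int)) fc =>
        let t := pvTotalFarm ano_escolhido fc.2
        let mx := if t > st.1.2 then (fc.1, t) else st.1
        let mn := if t < st.2.2 then (fc.1, t) else st.2
        (mx, mn)) ((fc0.1, t0), (fc0.1, t0))
    " -Fazenda com Produção Máxima: " ++ r.1.1 ++ "\n -Fazenda com Procução Mínima: " ++ r.2.1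

-- ===== PRECONDITION & SPEC =====
def Spec_fazenda_producao_maximo_minimo (ano_escolhido : String) (out : String) : Prop := out = fazenda_producao_maximo_minimo_alt ano_escolhido
instance (ano_escolhido : String) (out : String) : Decidable (Spec_fazenda_producao_maximo_minimo ano_escolhido out) := by unfold Spec_fazenda_producao_maximo_minimo; infer_instance

-- ===== CLAIM (what is proved, stated in full; the proofs are below) =====
def Claim_equal_fazenda_producao_maximo_minimo : Prop := ∀ (ano_escolhido : String), Dom_fazenda_producao_maximo_minimo ano_escolhido → Spec_fazenda_producao_maximo_minimo ano_escolhido (fazenda_producao_maximo_minimo ano_escolhido)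

-- ===== LEMMAS AND PROOFS =====
-- The data mentions only the years "2021"/"2022"/"2023"; for any other ano_escolhido every
-- equality test in both programs is false, so both reduce to the same literal result.
theorem pv_other (s : String) (h1 : s ≠ "2021") (h2 : s ≠ "2022") (h3 : s ≠ "2023") :
    fazenda_producao_maximo_minimo s = fazenda_producao_maximo_minimo_alt s := by
  have e1 : ("2021" == s) = false := beq_eq_false_iff_ne.mpr (fun e => h1 e.symm)
  have e2 : ("2022" == s) = false := beq_eq_false_iff_ne.mpr (fun e => h2 e.symm)
  have e3 : ("2023" == s) = false := beq_eq_false_iff_ne.mpr (fun e => h3 e.symm)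
  have n1 : ¬ ("2021" = s) := fun e => h1 e.symm
  have n2 : ¬ ("2022" = s) := fun e => h2 e.symm
  have n3 : ¬ ("2023" = s) := fun e => h3 e.symm
  simp [fazenda_producao_maximo_minimo, fazenda_producao_maximo_minimo_alt, bancoDeDados,
        pvTotalFarm, e1, e2, e3, n1, n2, n3, PySem.Dict.getD, PySem.Dict.get?, PySem.Dict.insert,
        PySem.Dict.empty, PySem.List.max?, PySem.List.min?]
  decide

-- ===== VERDICT (by name: the statement is the Claim_ definition above) =====
theorem fazenda_producao_maximo_minimo_spec : Claim_equal_fazenda_producao_maximo_minimo := by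
  intro ano _
  unfold Spec_fazenda_producao_maximo_minimo
  by_cases h1 : ano = "2021"
  · subst h1; decide
  · by_cases h2 : ano = "2022"
    · subst h2; decide
    · by_cases h3 : ano = "2023"
      · subst h3; decide
      · exact pv_other ano h1 h2 h3
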